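-- pv_equiv track=rewrite | github.com/b-cheek/Miscellaneous | noteSequence/sequence_stats_store.py | distance_from_center_increments
-- ===== SOURCE A (Python) =====
-- def distance_from_center_increments(seq):
--     """
--     the number of times the absolute distance from the center of the sequence increases
--     """
--     center = seq[0]
--     increments = 0
--     max_distance = 0
--     for i in range(1, len(seq)):
--         if abs(seq[i] - center) > max_distance:
--             increments += 1
--             max_distance = abs(seq[i] - center)
--     return increments
-- ===== SOURCE B (Python) =====
-- def distance_from_center_increments(seq):
--     """
--     the number of times the absolute distance from the center of the sequence increases
--     """
--     dists = [abs(x - seq[0]) for x in seq]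
--     cum = dists[:1]
--     for d in dists[1:]:
--         cum.append(max(cum[-1], d))
--     return sum(1 for a, b in zip(cum, cum[1:]) if b > a)
-- ===== Notes on version B (the rewrite author's own statement) =====
-- stated objective: alternative
-- what changed: Replaces A's single scan with two counters by a distance table, an explicit running-maximum prefix table, and a separate pass counting strict increases between consecutive prefix maxima.
import Mathlib
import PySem

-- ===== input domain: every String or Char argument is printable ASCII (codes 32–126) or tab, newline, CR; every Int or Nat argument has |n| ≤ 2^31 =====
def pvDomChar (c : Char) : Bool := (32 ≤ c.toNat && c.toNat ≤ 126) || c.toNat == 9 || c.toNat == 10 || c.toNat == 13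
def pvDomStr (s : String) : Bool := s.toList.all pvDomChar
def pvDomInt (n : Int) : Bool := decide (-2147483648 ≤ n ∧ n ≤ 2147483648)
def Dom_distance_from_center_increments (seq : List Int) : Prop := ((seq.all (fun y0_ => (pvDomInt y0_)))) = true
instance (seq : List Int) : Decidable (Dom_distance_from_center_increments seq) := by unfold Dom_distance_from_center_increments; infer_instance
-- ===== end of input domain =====

-- B replaces A's single scan (two mutable counters) by a distance table, a prefix-maximum
-- table, and a separate pass counting strict increases between consecutive prefix maxima
-- (objective: alternative decomposition, same O(n) cost).

-- ===== PORT A =====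
def distance_from_center_increments (seq : List Int) : Int :=
  let center := PySem.List.pyGetD seq 0 0
  let st :=
    (PySem.List.pyRange 1 (seq.length : Int) 1).foldl
      (fun (st : Int × Int) i =>
        if |PySem.List.pyGetD seq i 0 - center| > st.2 then
          (st.1 + 1, |PySem.List.pyGetD seq i 0 - center|)
        else st)
      (0, 0)
  st.1

-- ===== PORT B =====
def distance_from_center_increments_alt (seq : List Int) : Int :=
  let dists := seq.map (fun x => |x - PySem.List.pyGetD seq 0 0|)
  let cum0 := PySem.List.slice dists none (some 1)
  let cum :=
    (PySem.List.slice dists (some 1) none).foldl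
      (fun acc d => acc ++ [max (PySem.List.pyGetD acc (-1) 0) d]) cum0
  ((cum.zip cum.tail).countP (fun p => p.2 > p.1) : Int)

-- ===== PRECONDITION & SPEC =====
-- A raises IndexError on the empty list (seq[0]); those inputs are excluded.
def Pre_distance_from_center_increments (seq : List Int) : Prop := seq ≠ []
instance (seq : List Int) : Decidable (Pre_distance_from_center_increments seq) := by
  unfold Pre_distance_from_center_increments; infer_instance
def pvWitness_distance_from_center_increments : List Int := [3, 7, 1, -9]

def Spec_distance_from_center_increments (seq : List Int) (out : Int) : Prop :=
  out = distance_from_center_increments_alt seq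
instance (seq : List Int) (out : Int) : Decidable (Spec_distance_from_center_increments seq out) := by
  unfold Spec_distance_from_center_increments; infer_instance

-- ===== CLAIM (what is proved, stated in full; the proofs are below) =====
def Claim_equal_distance_from_center_increments : Prop :=
  ∀ (seq : List Int), Dom_distance_from_center_increments seq →
    Pre_distance_from_center_increments seq →
    Spec_distance_from_center_increments seq (distance_from_center_increments seq)

-- ===== LEMMAS AND PROOFS =====

/-- prefix-maximum scan starting from accumulator `m` (proof-side characterisation). -/
def pvPmax : Int → List Int → List Int
  | _, [] => []
  | m, d :: ds => max m d :: pvPmax (max m d) ds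

/-- B's append loop builds the prefix-max table. -/
theorem pv_cum_eq (ds : List Int) : ∀ (pre : List Int) (m : Int),
    ds.foldl (fun acc d => acc ++ [max (PySem.List.pyGetD acc (-1) 0) d]) (pre ++ [m])
      = (pre ++ [m]) ++ pvPmax m ds := by
  induction ds with
  | nil => intro pre m; simp [pvPmax]
  | cons d ds ih =>
    intro pre m
    simp only [List.foldl_cons, PySem.List.pyGetD_neg_one_append_singleton, pvPmax]
    have := ih (pre ++ [m]) (max m d)
    simpa [List.append_assoc] using this

/-- A's counting loop equals the number of strict increases of consecutive prefix maxima. -/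
theorem pv_count_eq (ds : List Int) : ∀ (m inc : Int),
    (ds.foldl (fun (st : Int × Int) x => if x > st.2 then (st.1 + 1, x) else st) (inc, m)).1
      = inc + (((m :: pvPmax m ds).zip (pvPmax m ds)).countP (fun p => p.2 > p.1) : Int) := by
  induction ds with
  | nil => intro m inc; simp [pvPmax]
  | cons d ds ih =>
    intro m inc
    simp only [List.foldl_cons, pvPmax, List.zip_cons_cons, List.countP_cons]
    by_cases h : d > m
    · have hmax : max m d = d := by omega
      have hlt : (decide (max m d > m)) = true := by simp [hmax]; omega
      rw [if_pos h]
      rw [ih d (inc + 1)]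
      rw [hmax] at hlt ⊢
      simp [hlt]; ring
    · have hmax : max m d = m := by omega
      rw [if_neg h]
      rw [ih m inc]
      rw [hmax]
      simp

theorem pv_main (seq : List Int) (h : seq ≠ []) :
    distance_from_center_increments seq = distance_from_center_increments_alt seq := by
  obtain ⟨c, rest, rfl⟩ : ∃ c rest, seq = c :: rest := by
    cases seq with
    | nil => exact absurd rfl h
    | cons c rest => exact ⟨c, rest, rfl⟩
  unfold distance_from_center_increments distance_from_center_increments_alt
  simp only [PySem.List.pyGetD_zero_cons]
  -- A's indexed loop is a fold over the tail
  rw [PySem.List.foldl_pyRange_pyGetD' (c :: rest) 0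
      (fun (st : Int × Int) x => if |x - c| > st.2 then (st.1 + 1, |x - c|) else st) (0, 0)
      (by norm_num : (0 : Int) ≤ 1)]
  -- B's slices
  have hmap : (c :: rest).map (fun x => |x - c|) = 0 :: rest.map (fun x => |x - c|) := by simp
  rw [hmap]
  rw [show PySem.List.slice (0 :: rest.map (fun x => |x - c|)) none (some 1)
        = [] ++ [(0 : Int)] from by
      simpa using PySem.List.slice_to_natCast (0 :: rest.map (fun x => |x - c|)) 1]
  rw [PySem.List.slice_from_one]
  simp only [List.tail_cons, Int.toNat_one, List.drop_one]
  rw [pv_cum_eq]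
  have hA : rest.foldl
      (fun (st : Int × Int) x => if |x - c| > st.2 then (st.1 + 1, |x - c|) else st) (0, 0)
      = (rest.map (fun x => |x - c|)).foldl
          (fun (st : Int × Int) x => if x > st.2 then (st.1 + 1, x) else st) (0, 0) := by
    rw [List.foldl_map]
  rw [hA, pv_count_eq]
  simp

-- ===== VERDICT (by name: the statement is the Claim_ definition above) =====
theorem distance_from_center_increments_spec : Claim_equal_distance_from_center_increments := by
  intro seq _ hpre
  unfold Spec_distance_from_center_increments
  exact pv_main seq hpre
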